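-- pv_equiv track=rewrite | github.com/Ankita5051/DSA | OA/oracle/largest subsequence.py | getsubseq
-- ===== SOURCE A (Python) =====
-- def getsubseq(s):
--     n=len(s)
--     result=[]
--     for l in range(1,n+1):
--         rm=n-l
--         st=[]
--         for c in s:
--             while st and rm and st[-1]<c:
--                 st.pop()
--                 rm-=1
--             st.append(c)
--         result.append("".join(st[:l]))
--     return result
-- ===== SOURCE B (Python) =====
-- def getsubseq(s):
--     n = len(s)
--     result = []
--     for l in range(1, n + 1):
--         out = []
--         start = 0
--         rem = l
--         while rem > 0:
--             w = s[start:n - rem + 1]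
--             c = max(w)
--             i = w.index(c)
--             out.append(c)
--             start += i + 1
--             rem -= 1
--         result.append("".join(out))
--     return result
-- ===== Notes on version B (the rewrite author's own statement) =====
-- stated objective: alternative
-- what changed: Replaces the per-length monotonic-stack pass (push/pop with a removal budget, then truncate) by a greedy window-max selection: for each length l it recursively picks the leftmost maximum character in the window that still leaves room for the remaining picks and recurses on the suffix after it.
import Mathlib
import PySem

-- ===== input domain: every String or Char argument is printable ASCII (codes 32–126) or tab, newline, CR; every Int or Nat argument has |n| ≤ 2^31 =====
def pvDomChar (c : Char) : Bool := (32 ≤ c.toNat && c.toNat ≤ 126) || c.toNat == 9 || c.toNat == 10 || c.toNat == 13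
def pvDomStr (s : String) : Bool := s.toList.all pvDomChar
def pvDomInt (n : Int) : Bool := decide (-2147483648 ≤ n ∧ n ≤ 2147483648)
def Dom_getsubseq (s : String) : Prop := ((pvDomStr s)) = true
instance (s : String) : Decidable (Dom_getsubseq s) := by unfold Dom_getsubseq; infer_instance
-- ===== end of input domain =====

-- B replaces A's per-length monotonic-stack pass by a greedy leftmost-window-max selection
-- (alternative algorithm, same exact output; neither is claimed faster).

-- ===== PORT A =====
-- the inner 'while st and rm and st[-1]<c: st.pop(); rm-=1' loop (stack in Python order, top = last)
def popLoop (st : List Char) (rm : Int) (c : Char) : List Char × Int :=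
  if h : st ≠ [] then
    if rm ≠ 0 ∧ st.getLast h < c then popLoop st.dropLast (rm - 1) c
    else (st, rm)
  else (st, rm)
termination_by st.length
decreasing_by
  simp only [List.length_dropLast]
  have : 0 < st.length := List.length_pos_iff.mpr h
  omega

-- one iteration of 'for c in s': pop loop, then st.append(c)
def stepA (acc : List Char × Int) (c : Char) : List Char × Int :=
  ((popLoop acc.1 acc.2 c).1 ++ [c], (popLoop acc.1 acc.2 c).2)

def getsubseq (s : String) : List String :=
  (PySem.List.pyRange 1 (PySem.Str.len s + 1)).foldl
    (fun result l =>
      result ++ [String.ofList (PySem.List.slice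
        (s.toList.foldl stepA ([], PySem.Str.len s - l)).1 none (some l))])
    []

-- ===== PORT B =====
-- the 'while rem > 0' loop of Source B, recursing on rem with the moving start index:
-- window w = s[start : n-rem+1], c = max(w), i = w.index(c), then start += i+1, rem -= 1
-- (the 'none => []' arms are unreachable for the calls made below: the window is nonempty)
def pickB (s : List Char) : Nat → Nat → List Char
  | _, 0 => []
  | start, r+1 =>
    match PySem.List.max? ((s.drop start).take (s.length - r - start)) (fun y => y) with
    | none => []
    | some c =>
      match PySem.List.index? ((s.drop start).take (s.length - r - start)) c with
      | none => []
      | some i => c :: pickB s (start + (i + 1)) r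

def getsubseq_alt (s : String) : List String :=
  -- [<the string picked for length l> for l in range(1, len(s)+1)], with l = k+1
  (List.range s.toList.length).map (fun k => String.ofList (pickB s.toList 0 (k+1)))

-- ===== PRECONDITION & SPEC =====
def Spec_getsubseq (s : String) (out : List String) : Prop := out = getsubseq_alt s
instance (s : String) (out : List String) : Decidable (Spec_getsubseq s out) := by unfold Spec_getsubseq; infer_instance

-- ===== CLAIM (what is proved, stated in full; the proofs are below) =====
def Claim_equal_getsubseq : Prop := ∀ (s : String), Dom_getsubseq s → Spec_getsubseq s (getsubseq s)

-- ===== LEMMAS AND PROOFS =====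

-- Nat-budget model of A's inner loop, with the stack REVERSED (top = head)
def popN : List Char → Nat → Char → List Char × Nat
  | [], m, _ => ([], m)
  | t :: r, m, c => if m ≠ 0 ∧ t < c then popN r (m-1) c else (t :: r, m)

def stepN (acc : List Char × Nat) (c : Char) : List Char × Nat :=
  (c :: (popN acc.1 acc.2 c).1, (popN acc.1 acc.2 c).2)

def runN (r : List Char) (m : Nat) (cs : List Char) : List Char × Nat := cs.foldl stepN (r, m)

def stackA (cs : List Char) (m : Nat) : List Char := (runN [] m cs).1.reverse

-- recursive characterisation of A's stack (budget m)
def RChar : List Char → Nat → List Char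
  | [], _ => []
  | a :: t, m => if ∀ x ∈ t.take m, x ≤ a then a :: RChar t m else RChar t (m-1)

lemma runN_nil (r : List Char) (m : Nat) : runN r m [] = (r, m) := rfl

lemma runN_cons (r : List Char) (m : Nat) (c : Char) (cs : List Char) :
    runN r m (c :: cs) = runN (c :: (popN r m c).1) (popN r m c).2 cs := rfl

-- pops conserve budget+length
lemma popN_count : ∀ (r : List Char) (m : Nat) (c : Char),
    (popN r m c).2 + r.length = m + (popN r m c).1.length := by
  intro r
  induction r with
  | nil => intro m c; simp [popN]
  | cons t r ih =>
    intro m c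
    by_cases h : m ≠ 0 ∧ t < c
    · have := ih (m-1) c
      simp only [popN, if_pos h, List.length_cons]
      omega
    · simp [popN, if_neg h]

lemma popN_subset : ∀ (r : List Char) (m : Nat) (c : Char), ∀ x ∈ (popN r m c).1, x ∈ r := by
  intro r
  induction r with
  | nil => intro m c x hx; simp [popN] at hx
  | cons t r ih =>
    intro m c x hx
    by_cases h : m ≠ 0 ∧ t < c
    · simp only [popN, if_pos h] at hx
      exact List.mem_cons_of_mem _ (ih (m-1) c x hx)
    · simpa [popN, if_neg h] using hx

-- appending a bottom element a is invisible unless the stack empties with budget left and c > a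
lemma popN_append : ∀ (r : List Char) (m : Nat) (c a : Char),
    (c ≤ a ∨ (popN r m c).1 ≠ [] ∨ (popN r m c).2 = 0) →
    popN (r ++ [a]) m c = ((popN r m c).1 ++ [a], (popN r m c).2) := by
  intro r
  induction r with
  | nil =>
    intro m c a hd
    simp only [popN, List.nil_append] at hd ⊢
    rcases hd with h | h | h
    · have : ¬ (m ≠ 0 ∧ a < c) := by rintro ⟨_, h2⟩; exact absurd h (not_le.mpr h2)
      simp [this]
    · simp at h
    · simp [h]
  | cons t r ih =>
    intro m c a hd
    by_cases h : m ≠ 0 ∧ t < c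
    · simp only [popN, if_pos h] at hd ⊢
      simp only [List.cons_append, popN, if_pos h]
      exact ih (m-1) c a hd
    · simp [popN, List.cons_append, if_neg h]

-- extra budget is unused when the stack is short enough
lemma popN_budget_succ : ∀ (r : List Char) (m : Nat) (c : Char), r.length ≤ m →
    popN r (m+1) c = ((popN r m c).1, (popN r m c).2 + 1) := by
  intro r
  induction r with
  | nil => intro m c _; simp [popN]
  | cons t r ih =>
    intro m c hlen
    have hm : m ≠ 0 := by simp at hlen; omega
    by_cases htc : t < c
    · have h1 : (m + 1) ≠ 0 ∧ t < c := ⟨by omega, htc⟩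
      have h2 : m ≠ 0 ∧ t < c := ⟨hm, htc⟩
      simp only [popN, if_pos h1, if_pos h2]
      have : m = (m - 1) + 1 := by omega
      rw [this]
      exact ih (m-1) c (by simp at hlen; omega)
    · have h1 : ¬ ((m + 1) ≠ 0 ∧ t < c) := by tauto
      have h2 : ¬ (m ≠ 0 ∧ t < c) := by tauto
      simp only [popN, if_neg h1, if_neg h2]

-- every element smaller than c and enough budget: the stack is wiped
lemma popN_all_lt : ∀ (r : List Char) (m : Nat) (c : Char),
    (∀ x ∈ r, x < c) → r.length ≤ m → popN r m c = ([], m - r.length) := by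
  intro r
  induction r with
  | nil => intro m c _ _; simp [popN]
  | cons t r ih =>
    intro m c hall hlen
    simp only [List.length_cons] at hlen
    have h : m ≠ 0 ∧ t < c := ⟨by omega, hall t (by simp)⟩
    simp only [popN, if_pos h]
    rw [ih (m-1) c (fun x hx => hall x (by simp [hx])) (by omega)]
    simp only [List.length_cons]
    congr 1
    omega

-- G1: a bottom element a dominating the reachable window is never popped
lemma runN_append_bottom : ∀ (cs r : List Char) (m : Nat) (a : Char),
    (∀ x ∈ cs.take (m - r.length), x ≤ a) →
    runN (r ++ [a]) m cs = ((runN r m cs).1 ++ [a], (runN r m cs).2) := by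
  intro cs
  induction cs with
  | nil => intro r m a _; simp [runN_nil]
  | cons c cs ih =>
    intro r m a hwin
    have hcnt := popN_count r m c
    have hd : c ≤ a ∨ (popN r m c).1 ≠ [] ∨ (popN r m c).2 = 0 := by
      by_cases he : (popN r m c).1 = [] ∧ (popN r m c).2 ≠ 0
      · left
        obtain ⟨h1, h2⟩ := he
        rw [h1] at hcnt
        simp at hcnt
        have hpos : 0 < m - r.length := by omega
        obtain ⟨j, hj⟩ : ∃ j, m - r.length = j + 1 := ⟨m - r.length - 1, by omega⟩
        apply hwin c
        rw [hj, List.take_succ_cons]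
        exact List.mem_cons_self
      · tauto
    rw [runN_cons, runN_cons, popN_append r m c a hd]
    have hstep : (c :: ((popN r m c).1 ++ [a])) = (c :: (popN r m c).1) ++ [a] := by simp
    rw [hstep]
    apply ih
    intro x hx
    have hlen : (popN r m c).2 - ((popN r m c).1.length + 1) = m - r.length - 1 := by omega
    simp only [List.length_cons] at hx ⊢
    rw [hlen] at hx
    apply hwin
    obtain ⟨j, hj⟩ : ∃ j, m - r.length = j + 1 := by
      rcases Nat.eq_zero_or_pos (m - r.length) with h0 | h0
      · rw [h0] at hx; simp at hx
      · exact ⟨m - r.length - 1, by omega⟩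
    rw [hj, List.take_succ_cons]
    rw [hj] at hx
    simp only [Nat.add_sub_cancel] at hx
    exact List.mem_cons_of_mem _ hx

-- G2: lockstep with budgets m+1 vs m while all incoming chars are ≤ a
lemma runN_lockstep : ∀ (u r : List Char) (m : Nat) (a : Char),
    (∀ x ∈ u, x ≤ a) → r.length + u.length ≤ m →
    runN (r ++ [a]) (m+1) u = ((runN r m u).1 ++ [a], (runN r m u).2 + 1) ∧
    (∀ x ∈ (runN r m u).1, x ∈ r ∨ x ∈ u) ∧
    (runN r m u).1.length ≤ (runN r m u).2 := by
  intro u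
  induction u with
  | nil =>
    intro r m a _ hlen
    refine ⟨by simp [runN_nil], by simp [runN_nil], by simp [runN_nil]; omega⟩
  | cons c u ih =>
    intro r m a hall hlen
    simp only [List.length_cons] at hlen
    have hrm : r.length ≤ m := by omega
    have hca : c ≤ a := hall c (by simp)
    have hcnt := popN_count r m c
    have hp3 := popN_budget_succ r m c hrm
    have hp1 := popN_append r (m+1) c a (Or.inl hca)
    have hih := ih (c :: (popN r m c).1) (popN r m c).2 a
      (fun x hx => hall x (by simp [hx]))
      (by simp only [List.length_cons]; omega)
    obtain ⟨e1, e2, e3⟩ := hih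
    refine ⟨?_, ?_, ?_⟩
    · rw [runN_cons, runN_cons, hp1, hp3]
      have hm1 : (popN r m c).2 + 1 = (popN r m c).2 + 1 := rfl
      have hstep : (c :: ((popN r m c).1 ++ [a])) = (c :: (popN r m c).1) ++ [a] := by simp
      rw [hstep]
      exact e1
    · rw [runN_cons]
      intro x hx
      rcases e2 x hx with h | h
      · rcases List.mem_cons.mp h with h' | h'
        · right; simp [h']
        · left; exact popN_subset r m c x h'
      · right; exact List.mem_cons_of_mem _ h
    · rw [runN_cons]; exact e3

-- E1: a dominates its window → a is the bottom of the final stack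
lemma stackA_cons_max (a : Char) (t : List Char) (m : Nat) (h : ∀ x ∈ t.take m, x ≤ a) :
    stackA (a :: t) m = a :: stackA t m := by
  unfold stackA
  have h0 : runN [] m (a :: t) = runN [a] m t := rfl
  have h1 : runN ([] ++ [a]) m t = ((runN [] m t).1 ++ [a], (runN [] m t).2) :=
    runN_append_bottom t [] m a (by simpa using h)
  simp only [List.nil_append] at h1
  rw [h0, h1]
  simp

lemma dropWhile_cons_head_false (p : Char → Bool) (t : List Char) (c : Char) (v : List Char)
    (h : t.dropWhile p = c :: v) : p c = false := by
  induction t with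
  | nil => simp at h
  | cons a t ih =>
    rw [List.dropWhile_cons] at h
    by_cases hp : p a = true
    · rw [if_pos hp] at h; exact ih h
    · rw [if_neg hp] at h
      obtain ⟨rfl, rfl⟩ : a = c ∧ t = v := by injection h with h1 h2; exact ⟨h1, h2⟩
      simpa using hp

-- E2: some window element beats a → a is popped and one budget unit is spent
lemma runN_cons_lt (a : Char) (t : List Char) (m : Nat) (hw : ∃ x ∈ t.take m, a < x) :
    runN [] m (a :: t) = runN [] (m-1) t := by
  obtain ⟨x0, hx0mem, hx0⟩ := hw
  set p : Char → Bool := fun x => decide (x ≤ a) with hp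
  set u := t.takeWhile p with hu
  have hu_le : ∀ x ∈ u, x ≤ a := by
    intro x hx
    have := List.mem_takeWhile_imp hx
    simpa [hp] using this
  have hulen : u.length < m := by
    by_contra hcon
    push_neg at hcon
    obtain ⟨v, hv⟩ : ∃ v, t = u ++ v := ⟨t.dropWhile p, (List.takeWhile_append_dropWhile).symm⟩
    rw [hv, List.take_append_of_le_length hcon] at hx0mem
    have : x0 ∈ u := List.mem_of_mem_take hx0mem
    exact absurd (hu_le x0 this) (not_le.mpr hx0)
  have hdne : t.dropWhile p ≠ [] := by
    intro hnil
    have : t = u := by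
      conv_lhs => rw [← List.takeWhile_append_dropWhile (p := p) (l := t)]
      rw [hnil]; simp [hu]
    rw [this] at hx0mem
    exact absurd (hu_le x0 (List.mem_of_mem_take hx0mem)) (not_le.mpr hx0)
  obtain ⟨c, v, hcv⟩ : ∃ c v, t.dropWhile p = c :: v := by
    cases hdw : t.dropWhile p with
    | nil => exact absurd hdw hdne
    | cons c v => exact ⟨c, v, rfl⟩
  have hac : a < c := by
    have := dropWhile_cons_head_false p t c v hcv
    simp only [hp, decide_eq_false_iff_not] at this
    exact not_le.mp this
  have ht : t = u ++ c :: v := by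
    conv_lhs => rw [← List.takeWhile_append_dropWhile (p := p) (l := t)]
    rw [hcv]
  obtain ⟨m', hm'⟩ : ∃ m', m = m' + 1 := ⟨m - 1, by omega⟩
  have hG2 := runN_lockstep u [] m' a hu_le (by simp only [List.length_nil, Nat.zero_add]; omega)
  obtain ⟨e1, e2, e3⟩ := hG2
  have hstart : runN [] m (a :: t) = runN ([] ++ [a]) (m' + 1) t := by
    rw [hm']; rfl
  rw [hstart, ht]
  have hsplit1 : runN ([] ++ [a]) (m' + 1) (u ++ c :: v) =
      (u ++ c :: v).foldl stepN ([] ++ [a], m' + 1) := rfl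
  rw [hsplit1, List.foldl_append]
  have hfold_u : u.foldl stepN ([] ++ [a], m' + 1) = ((runN [] m' u).1 ++ [a], (runN [] m' u).2 + 1) := e1
  rw [hfold_u]
  set r1 := (runN [] m' u).1 with hr1
  set m1 := (runN [] m' u).2 with hm1
  have hr1a : ∀ x ∈ r1, x ≤ a := by
    intro x hx
    rcases e2 x hx with h | h
    · simp at h
    · exact hu_le x h
  have hr1lt : ∀ x ∈ r1 ++ [a], x < c := by
    intro x hx
    rcases List.mem_append.mp hx with h | h
    · exact lt_of_le_of_lt (hr1a x h) hac
    · simp at h; rw [h]; exact hac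
  have hP4a : popN (r1 ++ [a]) (m1 + 1) c = ([], (m1 + 1) - (r1 ++ [a]).length) :=
    popN_all_lt (r1 ++ [a]) (m1+1) c hr1lt
      (by simp only [List.length_append, List.length_cons, List.length_nil]; omega)
  have hP4b : popN r1 m1 c = ([], m1 - r1.length) :=
    popN_all_lt r1 m1 c (fun x hx => lt_of_le_of_lt (hr1a x hx) hac) e3
  have hlen2 : (m1 + 1) - (r1 ++ [a]).length = m1 - r1.length := by
    simp only [List.length_append, List.length_cons, List.length_nil]; omega
  have hpair : runN [] m' u = (r1, m1) := rfl
  have hother : runN [] (m-1) (u ++ c :: v) = (c :: v).foldl stepN (r1, m1) := by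
    rw [hm']
    simp only [Nat.add_sub_cancel]
    show (u ++ c :: v).foldl stepN ([], m') = _
    rw [List.foldl_append]
    show (c :: v).foldl stepN (runN [] m' u) = _
    rw [hpair]
  rw [hother]
  show (c :: v).foldl stepN (r1 ++ [a], m1 + 1) = (c :: v).foldl stepN (r1, m1)
  simp only [List.foldl_cons]
  have hsA : stepN (r1 ++ [a], m1 + 1) c = ([c], m1 - r1.length) := by
    simp [stepN, hP4a]
  have hsB : stepN (r1, m1) c = ([c], m1 - r1.length) := by
    simp [stepN, hP4b]
  rw [hsA, hsB]

-- MAIN: the final stack is RChar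
lemma stackA_eq_RChar : ∀ (cs : List Char) (m : Nat), stackA cs m = RChar cs m := by
  intro cs
  induction cs with
  | nil => intro m; rfl
  | cons a t ih =>
    intro m
    by_cases h : ∀ x ∈ t.take m, x ≤ a
    · rw [stackA_cons_max a t m h, ih m, RChar, if_pos h]
    · push_neg at h
      obtain ⟨x0, hx0m, hx0⟩ := h
      have := runN_cons_lt a t m ⟨x0, hx0m, not_le.mp (by exact not_le.mpr hx0)⟩
      rw [RChar, if_neg (by push_neg; exact ⟨x0, hx0m, hx0⟩)]
      have hst : stackA (a :: t) m = stackA t (m-1) := by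
        unfold stackA
        rw [this]
      rw [hst, ih (m-1)]

-- folding max over elements all ≤ a keeps a
lemma foldl_max_all_le : ∀ (ys : List Char) (a : Char), (∀ y ∈ ys, y ≤ a) → ys.foldl max a = a := by
  intro ys
  induction ys with
  | nil => intro a _; rfl
  | cons y ys ih =>
    intro a h
    have : max a y = a := max_eq_left (h y (by simp))
    simp only [List.foldl_cons, this]
    exact ih a (fun z hz => h z (by simp [hz]))

lemma foldl_max_comm : ∀ (ys : List Char) (a b : Char), ys.foldl max (max a b) = max a (ys.foldl max b) := by
  intro ys
  induction ys with
  | nil => intro a b; rfl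
  | cons y ys ih =>
    intro a b
    simp only [List.foldl_cons]
    rw [max_assoc, ih]

lemma max?_cons_of_all_le (w : List Char) (a : Char) (h : ∀ x ∈ w, x ≤ a) :
    PySem.List.max? (a :: w) (fun y => y) = some a := by
  rw [PySem.List.max?_id_cons]
  rw [foldl_max_all_le w a h]

lemma max?_cons_of_lt (w : List Char) (a cm : Char)
    (hm : PySem.List.max? w (fun y => y) = some cm) (hlt : a < cm) :
    PySem.List.max? (a :: w) (fun y => y) = some cm := by
  cases w with
  | nil =>
    have hnone : PySem.List.max? ([] : List Char) (fun y => y) = none :=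
      (PySem.List.max?_eq_none_iff _ _).mpr rfl
    rw [hnone] at hm
    simp at hm
  | cons h rest =>
    rw [PySem.List.max?_id_cons] at hm ⊢
    simp only [List.foldl_cons] at hm ⊢
    have : rest.foldl max (max a h) = max a (rest.foldl max h) := foldl_max_comm rest a h
    rw [this]
    injection hm with hm'
    rw [hm', max_eq_right (le_of_lt hlt)]

-- suffix-recursion form of the greedy pick (proof device), and its unfolding step
def pickS : List Char → Nat → List Char
  | _, 0 => []
  | t, r+1 =>
    match PySem.List.max? (t.take (t.length - r)) (fun y => y) with
    | none => []
    | some c =>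
      match PySem.List.index? (t.take (t.length - r)) c with
      | none => []
      | some i => c :: pickS (t.drop (i+1)) r

lemma pickS_eq (t : List Char) (r : Nat) (c : Char) (i : Nat)
    (hmax : PySem.List.max? (t.take (t.length - r)) (fun y => y) = some c)
    (hidx : PySem.List.index? (t.take (t.length - r)) c = some i) :
    pickS t (r+1) = c :: pickS (t.drop (i+1)) r := by
  simp only [pickS, hmax, hidx]

-- Source B's start-index loop computes the suffix recursion
lemma pickB_eq_pickS : ∀ (r : Nat) (s : List Char) (start : Nat),
    pickB s start r = pickS (s.drop start) r := by
  intro r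
  induction r with
  | zero => intro s start; rfl
  | succ r ih =>
    intro s start
    have hwN : s.length - r - start = (s.drop start).length - r := by
      rw [List.length_drop]; omega
    cases hmx : PySem.List.max? ((s.drop start).take ((s.drop start).length - r)) (fun y => y) with
    | none =>
      have hmx' : PySem.List.max? ((s.drop start).take (s.length - r - start)) (fun y => y) = none := by
        rw [hwN]; exact hmx
      simp only [pickB, pickS, hmx, hmx']
    | some c =>
      have hmx' : PySem.List.max? ((s.drop start).take (s.length - r - start)) (fun y => y) = some c := by
        rw [hwN]; exact hmx
      cases hix : PySem.List.index? ((s.drop start).take ((s.drop start).length - r)) c with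
      | none =>
        have hix' : PySem.List.index? ((s.drop start).take (s.length - r - start)) c = none := by
          rw [hwN]; exact hix
        simp only [pickB, pickS, hmx, hmx', hix, hix']
      | some i =>
        have hix' : PySem.List.index? ((s.drop start).take (s.length - r - start)) c = some i := by
          rw [hwN]; exact hix
        simp only [pickB, pickS, hmx, hmx', hix, hix']
        rw [ih s (start + (i + 1))]
        have hdd : s.drop (start + (i + 1)) = (s.drop start).drop (i + 1) := by
          rw [List.drop_drop]
        rw [hdd]

-- TAKE: first l elements of RChar with budget (len - l) = greedy pick
lemma RChar_take_eq_pickB : ∀ (cs : List Char) (l : Nat), l ≤ cs.length →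
    (RChar cs (cs.length - l)).take l = pickS cs l := by
  intro cs
  induction cs with
  | nil =>
    intro l hl
    simp only [List.length_nil, Nat.le_zero] at hl
    subst hl
    rfl
  | cons a t ih =>
    intro l hl
    cases l with
    | zero => rfl
    | succ l' =>
      simp only [List.length_cons] at hl
      have hl' : l' ≤ t.length := by omega
      set m := t.length - l' with hm
      have hlen1 : (a :: t).length - (l' + 1) = m := by simp; omega
      have hlen2 : (a :: t).length - l' = m + 1 := by simp; omega
      have hwin : (a :: t).take ((a :: t).length - l') = a :: t.take m := by
        rw [hlen2, List.take_succ_cons]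
      by_cases hc : ∀ x ∈ t.take m, x ≤ a
      · -- a is the leftmost maximum of the window
        rw [hlen1, RChar, if_pos hc]
        show a :: (RChar t m).take l' = pickS (a :: t) (l' + 1)
        have hmax : PySem.List.max? ((a :: t).take ((a :: t).length - l')) (fun y => y) = some a := by
          rw [hwin]; exact max?_cons_of_all_le (t.take m) a hc
        have hidx : PySem.List.index? ((a :: t).take ((a :: t).length - l')) a = some 0 := by
          rw [hwin]; exact PySem.List.index?_cons_self a (t.take m)
        rw [pickS_eq (a :: t) l' a 0 hmax hidx]
        simp only [List.drop_succ_cons, List.drop_zero]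
        rw [ih l' hl']
      · push_neg at hc
        obtain ⟨x0, hx0m, hx0⟩ := hc
        have hlt0 : a < x0 := not_le.mp (by exact not_le.mpr hx0)
        have hmpos : 0 < m := by
          by_contra h0
          push_neg at h0
          interval_cases m
          simp at hx0m
        have hl'' : l' + 1 ≤ t.length := by omega
        -- the window's maximum cm beats a; B skips a entirely
        have hwne : t.take m ≠ [] := by intro h0; rw [h0] at hx0m; simp at hx0m
        obtain ⟨cm, hcm⟩ : ∃ cm, PySem.List.max? (t.take m) (fun y => y) = some cm := by
          cases hmx : PySem.List.max? (t.take m) (fun y => y) with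
          | none => exact absurd ((PySem.List.max?_eq_none_iff _ _).mp hmx) hwne
          | some cm => exact ⟨cm, rfl⟩
        have hacm : a < cm := lt_of_lt_of_le hlt0 (PySem.List.max?_isMax hcm x0 hx0m)
        obtain ⟨i, hi⟩ : ∃ i, PySem.List.index? (t.take m) cm = some i := by
          have : cm ∈ t.take m := PySem.List.max?_mem hcm
          have := (PySem.List.index?_isSome_iff (t.take m) cm).mpr this
          cases hix : PySem.List.index? (t.take m) cm with
          | none => rw [hix] at this; simp at this
          | some i => exact ⟨i, rfl⟩
        have hBcons : pickS (a :: t) (l' + 1) = pickS t (l' + 1) := by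
          have hmax1 : PySem.List.max? ((a :: t).take ((a :: t).length - l')) (fun y => y) = some cm := by
            rw [hwin]; exact max?_cons_of_lt (t.take m) a cm hcm hacm
          have hidx1 : PySem.List.index? ((a :: t).take ((a :: t).length - l')) cm = some (i + 1) := by
            rw [hwin, PySem.List.index?_cons_of_ne _ (ne_of_lt hacm), hi]; rfl
          have hmax2 : PySem.List.max? (t.take (t.length - l')) (fun y => y) = some cm := by
            rw [← hm]; exact hcm
          have hidx2 : PySem.List.index? (t.take (t.length - l')) cm = some i := by
            rw [← hm]; exact hi
          rw [pickS_eq (a :: t) l' cm (i + 1) hmax1 hidx1, pickS_eq t l' cm i hmax2 hidx2]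
          simp only [List.drop_succ_cons]
        rw [hlen1, RChar, if_neg (by push_neg; exact ⟨x0, hx0m, hx0⟩), hBcons]
        have := ih (l' + 1) hl''
        have hmm : m - 1 = t.length - (l' + 1) := by omega
        rw [hmm, this]

-- bridge: the Int-budget Python-order loop equals the Nat-budget reversed-stack model
lemma popLoop_rev : ∀ (r : List Char) (m : Nat) (c : Char),
    popLoop r.reverse (m : Int) c = ((popN r m c).1.reverse, ((popN r m c).2 : Int)) := by
  intro r
  induction r with
  | nil => intro m c; rw [popLoop]; simp [popN]
  | cons t r ih =>
    intro m c
    have hne : (t :: r).reverse ≠ [] := by simp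
    rw [popLoop, dif_pos hne]
    have hlast : ((t :: r).reverse).getLast hne = t := by
      simp only [List.reverse_cons]
      exact List.getLast_concat
    have hdl : ((t :: r).reverse).dropLast = r.reverse := by
      simp only [List.reverse_cons]
      exact List.dropLast_concat
    rw [hlast, hdl]
    by_cases h : m ≠ 0 ∧ t < c
    · have hInt : (m : Int) ≠ 0 ∧ t < c := ⟨by exact_mod_cast h.1, h.2⟩
      rw [if_pos hInt]
      have hcast : (m : Int) - 1 = ((m - 1 : Nat) : Int) := by omega
      rw [hcast, ih (m-1) c]
      simp [popN, if_pos h]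
    · have hInt : ¬ ((m : Int) ≠ 0 ∧ t < c) := by
        intro hcon
        exact h ⟨by exact_mod_cast hcon.1, hcon.2⟩
      rw [if_neg hInt]
      simp [popN, if_neg h]

lemma foldl_stepA_rev : ∀ (cs r : List Char) (m : Nat),
    cs.foldl stepA (r.reverse, (m : Int)) = ((runN r m cs).1.reverse, ((runN r m cs).2 : Int)) := by
  intro cs
  induction cs with
  | nil => intro r m; simp [runN_nil]
  | cons c cs ih =>
    intro r m
    simp only [List.foldl_cons]
    have hstep : stepA (r.reverse, (m : Int)) c =
        ((c :: (popN r m c).1).reverse, ((popN r m c).2 : Int)) := by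
      simp only [stepA, popLoop_rev r m c, List.reverse_cons]
    rw [hstep, ih (c :: (popN r m c).1) (popN r m c).2, runN_cons]

lemma foldl_stepA_eq_stackA (cs : List Char) (m : Nat) :
    (cs.foldl stepA ([], (m : Int))).1 = stackA cs m := by
  have h := foldl_stepA_rev cs [] m
  simp only [List.reverse_nil] at h
  rw [h]
  rfl

-- ===== VERDICT (by name: the statement is the Claim_ definition above) =====
theorem getsubseq_spec : Claim_equal_getsubseq := by
  intro s _
  show getsubseq s = getsubseq_alt s
  unfold getsubseq getsubseq_alt
  rw [PySem.Str.len_eq]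
  rw [PySem.List.foldl_append_singleton_eq_map]
  rw [PySem.List.pyRange_one]
  simp only [List.map_map, List.nil_append]
  have hn : ((s.toList.length : Int) + 1 - 1).toNat = s.toList.length := by omega
  rw [hn]
  apply List.map_congr_left
  intro k hk
  have hk' : k < s.toList.length := List.mem_range.mp hk
  simp only [Function.comp]
  have hcast : (s.toList.length : Int) - (1 + (k : Int)) = ((s.toList.length - (k+1) : Nat) : Int) := by
    omega
  rw [hcast, foldl_stepA_eq_stackA]
  rw [PySem.List.slice_to _ (by omega)]
  have htn : ((1 : Int) + (k : Int)).toNat = k + 1 := by omega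
  rw [htn, stackA_eq_RChar]
  rw [pickB_eq_pickS (k+1) s.toList 0, List.drop_zero]
  have := RChar_take_eq_pickB s.toList (k+1) (by omega)
  rw [← this]
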